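-- pv_equiv track=rewrite | github.com/rjt2004/fitness-action-eval | fitness_action_eval/baduanjin.py | _smooth_short_substage_runs
-- ===== SOURCE A (Python) =====
-- from typing import Any, Dict, List, Mapping, Sequence
--
-- def _smooth_short_substage_runs(keys: List[str], min_run: int) -> List[str]:
--     if len(keys) < 3 or min_run <= 1:
--         return keys
--     smoothed = list(keys)
--     idx = 0
--     while idx < len(smoothed):
--         end = idx + 1
--         while end < len(smoothed) and smoothed[end] == smoothed[idx]:
--             end += 1
--         if end - idx < min_run:
--             replacement = None
--             if idx > 0:
--                 replacement = smoothed[idx - 1]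
--             elif end < len(smoothed):
--                 replacement = smoothed[end]
--             if replacement:
--                 for replace_idx in range(idx, end):
--                     smoothed[replace_idx] = replacement
--         idx = end
--     return smoothed
-- ===== SOURCE B (Python) =====
-- def _smooth_short_substage_runs(keys, min_run):
--     if len(keys) < 3 or min_run <= 1:
--         return keys
--     n = len(keys)
--     # run_len[i] = length of the maximal run of equal values containing index i,
--     # computed by a backward pass (suffix run length) then a forward fix-up pass.
--     run_len = [1] * n
--     for i in range(n - 2, -1, -1):
--         if keys[i] == keys[i + 1]:
--             run_len[i] = run_len[i + 1] + 1
--     for i in range(1, n):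
--         if keys[i] == keys[i - 1]:
--             run_len[i] = run_len[i - 1]
--     first_repl = keys[run_len[0]] if run_len[0] < n else None
--     out = []
--     for i in range(n):
--         if run_len[i] >= min_run:
--             out.append(keys[i])
--         elif i > 0 and keys[i] == keys[i - 1]:
--             out.append(out[-1])
--         else:
--             repl = out[-1] if i > 0 else first_repl
--             out.append(repl if repl else keys[i])
--     return out
-- ===== Notes on version B (the rewrite author's own statement) =====
-- stated objective: alternative
-- what changed: Replaces A's in-place run-window rewriting (while loop scanning for each run's end and overwriting a slice of a copied list) by per-index array passes: a backward pass computing a run-length array, a forward fix-up pass, and then an element-wise output recurrence that never delimits runs explicitly.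
import Mathlib
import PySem

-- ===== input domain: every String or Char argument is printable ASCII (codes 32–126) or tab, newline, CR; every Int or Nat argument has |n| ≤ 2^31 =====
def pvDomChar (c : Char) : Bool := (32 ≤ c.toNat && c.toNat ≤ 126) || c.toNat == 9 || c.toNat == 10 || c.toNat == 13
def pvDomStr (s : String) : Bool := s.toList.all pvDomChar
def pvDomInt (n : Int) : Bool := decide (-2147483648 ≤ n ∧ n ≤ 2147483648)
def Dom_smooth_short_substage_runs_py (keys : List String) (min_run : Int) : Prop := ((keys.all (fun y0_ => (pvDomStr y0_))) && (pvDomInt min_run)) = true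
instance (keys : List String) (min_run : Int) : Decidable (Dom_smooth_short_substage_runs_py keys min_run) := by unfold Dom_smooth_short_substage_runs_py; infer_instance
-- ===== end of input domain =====

-- B replaces A's in-place run-window rewriting by per-index array passes (a backward
-- run-length pass, a forward fix-up pass, and an element-wise output recurrence). Same cost.

-- ===== PORT A =====
-- inner while: advance `end` while in range and equal to the run's value
def pvFindEnd (s : List String) (v : String) (e : Nat) : Nat :=
  if h : e < s.length then
    if s[e] = v then pvFindEnd s v (e + 1) else e
  else e
termination_by s.length - e

theorem pvFindEnd_ge (s : List String) (v : String) (e : Nat) : e ≤ pvFindEnd s v e := by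
  unfold pvFindEnd
  split
  · split
    · exact Nat.le_trans (Nat.le_succ e) (pvFindEnd_ge s v (e + 1))
    · exact Nat.le_refl e
  · exact Nat.le_refl e
termination_by s.length - e

-- one iteration of the outer loop body: the replacement step on the run [idx, e)
def pvStep (s : List String) (idx e : Nat) (m : Int) : List String :=
  if (e : Int) - (idx : Int) < m then
    let repl : Option String :=
      if idx > 0 then some s[idx - 1]!
      else if e < s.length then some s[e]! else none
    match repl with
    | some r => if r ≠ "" then s.mapIdx (fun i x => if idx ≤ i ∧ i < e then r else x) else s
    | none => s
  else s

theorem pvStep_length (s : List String) (idx e : Nat) (m : Int) :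
    (pvStep s idx e m).length = s.length := by
  unfold pvStep
  split
  · simp only []
    split <;> (try split) <;> simp
  · rfl

-- outer while loop of A; the range-assignment for loop is written as mapIdx over the window
def pvLoopA (s : List String) (idx : Nat) (m : Int) : List String :=
  if h : idx < s.length then
    pvLoopA (pvStep s idx (pvFindEnd s s[idx]! (idx + 1)) m) (pvFindEnd s s[idx]! (idx + 1)) m
  else s
termination_by s.length - idx
decreasing_by
  have h1 : idx + 1 ≤ pvFindEnd s s[idx]! (idx + 1) := pvFindEnd_ge s s[idx]! (idx + 1)
  have h2 := pvStep_length s idx (pvFindEnd s s[idx]! (idx + 1)) m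
  omega

def smooth_short_substage_runs_py (keys : List String) (min_run : Int) : List String :=
  if (keys.length : Int) < 3 ∨ min_run ≤ 1 then keys else pvLoopA keys 0 min_run

-- ===== PORT B =====
-- backward pass over range(n-2,-1,-1): run_len[i] = 1, or run_len[i+1]+1 when keys[i]==keys[i+1]
def pvSuffLen : List String → List Nat
  | [] => []
  | [_] => [1]
  | x :: y :: rest =>
    let L := pvSuffLen (y :: rest)
    (if x = y then L.head! + 1 else 1) :: L

-- forward fix-up pass over range(1,n), carrying keys[i-1] and run_len[i-1]
def pvFix : String → Nat → List String → List Nat → List Nat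
  | pk, pl, k :: ks, l :: ls =>
    let l' := if k = pk then pl else l
    l' :: pvFix k l' ks ls
  | _, _, _, _ => []

def pvFix0 : List String → List Nat → List Nat
  | k :: ks, l :: ls => l :: pvFix k l ks ls
  | _, _ => []

def pvRunLens (keys : List String) : List Nat := pvFix0 keys (pvSuffLen keys)

-- output loop over i (keys zipped with run_len), carrying keys[i-1] and the out list;
-- out.getLast! / out.getLast? render Python's out[-1] (out is nonempty whenever it is read)
def pvPass3 (m : Int) (repl0 : Option String) (prev : Option String) (out : List String) : List (String × Nat) → List String
  | [] => out
  | (k, l) :: rest =>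
    let v :=
      if (l : Int) ≥ m then k
      else if prev = some k then out.getLast!
      else
        match (match prev with | some _ => out.getLast? | none => repl0) with
        | some r => if r ≠ "" then r else k
        | none => k
    pvPass3 m repl0 (some k) (out ++ [v]) rest

def smooth_short_substage_runs_py_alt (keys : List String) (min_run : Int) : List String :=
  if (keys.length : Int) < 3 ∨ min_run ≤ 1 then keys
  else
    let L := pvRunLens keys
    -- first_repl = keys[run_len[0]] if run_len[0] < n else None
    let first_repl : Option String :=
      match L.head? with
      | some l0 => keys[l0]?
      | none => none
    pvPass3 min_run first_repl none [] (keys.zip L)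

-- ===== PRECONDITION & SPEC =====
def Spec_smooth_short_substage_runs_py (keys : List String) (min_run : Int) (out : List String) : Prop := out = smooth_short_substage_runs_py_alt keys min_run
instance (keys : List String) (min_run : Int) (out : List String) : Decidable (Spec_smooth_short_substage_runs_py keys min_run out) := by unfold Spec_smooth_short_substage_runs_py; infer_instance

-- ===== CLAIM (what is proved, stated in full; the proofs are below) =====
def Claim_equal_smooth_short_substage_runs_py : Prop := ∀ (keys : List String) (min_run : Int), Dom_smooth_short_substage_runs_py keys min_run → Spec_smooth_short_substage_runs_py keys min_run (smooth_short_substage_runs_py keys min_run)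

-- ===== LEMMAS AND PROOFS =====

/-- run-length decomposition of a list (proof device; neither port computes it) -/
def pvRuns : List String → List (String × Nat)
  | [] => []
  | x :: xs =>
    (x, (xs.takeWhile (· == x)).length + 1) :: pvRuns (xs.dropWhile (· == x))
termination_by l => l.length
decreasing_by
  have := List.length_dropWhile_le (· == x) xs
  simp; omega

/-- run-level reference construction both ports are proved equal to -/
def pvBuildB (out : List String) (i : Nat) (runs : List (String × Nat)) (m : Int) : List String :=
  match runs with
  | [] => out
  | (v, n) :: rest =>
    let seg :=
      if (n : Int) ≥ m then List.replicate n v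
      else
        let repl : Option String := if i = 0 then rest.head?.map Prod.fst else out.getLast?
        match repl with
        | some r => if r ≠ "" then List.replicate n r else List.replicate n v
        | none => List.replicate n v
    pvBuildB (out ++ seg) (i + 1) rest m

/-- flatten a run list back into the string list it encodes -/
def pvFlat (rl : List (String × Nat)) : List String :=
  rl.flatMap (fun p => List.replicate p.2 p.1)

/-- well-formed run list: adjacent values distinct -/
def pvRunsOk : List (String × Nat) → Prop
  | [] => True
  | (v, _) :: rest => (∀ p ∈ rest.head?, p.1 ≠ v) ∧ pvRunsOk rest

theorem pvRuns_len_pos : ∀ (l : List String), ∀ p ∈ pvRuns l, 1 ≤ p.2 := by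
  intro l
  induction l using pvRuns.induct with
  | case1 => intro p hp; simp [pvRuns] at hp
  | case2 x xs ih =>
    intro p hp
    rw [pvRuns] at hp
    rcases List.mem_cons.mp hp with hp | hp
    · simp [hp]
    · exact ih p hp

theorem pvRuns_head (l : List String) : (pvRuns l).head?.map Prod.fst = l.head? := by
  cases l with
  | nil => simp [pvRuns]
  | cons x xs => rw [pvRuns]; simp

theorem pvRuns_flat (keys : List String) : pvFlat (pvRuns keys) = keys := by
  induction keys using pvRuns.induct with
  | case1 => simp [pvRuns, pvFlat]
  | case2 x xs ih =>
    rw [pvRuns]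
    simp only [pvFlat, List.flatMap_cons] at ih ⊢
    rw [ih]
    have htw : xs.takeWhile (· == x) = List.replicate (xs.takeWhile (· == x)).length x := by
      rw [List.eq_replicate_iff]
      exact ⟨rfl, fun b hb => by simpa using List.mem_takeWhile_imp hb⟩
    calc List.replicate ((xs.takeWhile (· == x)).length + 1) x ++ xs.dropWhile (· == x)
        = x :: (xs.takeWhile (· == x) ++ xs.dropWhile (· == x)) := by
          rw [List.replicate_succ]; rw [← htw]; simp
      _ = x :: xs := by rw [List.takeWhile_append_dropWhile]

theorem pvRuns_ok (keys : List String) : pvRunsOk (pvRuns keys) := by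
  induction keys using pvRuns.induct with
  | case1 => simp [pvRuns, pvRunsOk]
  | case2 x xs ih =>
    rw [pvRuns]
    refine ⟨?_, ih⟩
    intro p hp
    rw [Option.mem_def] at hp
    have hh := pvRuns_head (xs.dropWhile (· == x))
    intro hpx
    have hne : xs.dropWhile (· == x) ≠ [] := by
      intro hnil
      rw [hnil] at hp
      simp [pvRuns] at hp
    have hhead : (xs.dropWhile (· == x)).head? = some p.1 := by
      rw [← hh, hp]
      rfl
    have hnot := List.head_dropWhile_not (p := (· == x)) (l := xs) hne
    rw [List.head?_eq_some_head hne] at hhead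
    have : (xs.dropWhile (· == x)).head hne = p.1 := by injection hhead
    rw [this, hpx] at hnot
    simp at hnot

theorem pvGetBang (l1 l2 : List String) (i : Nat) (h1 : l1.length ≤ i) (h2 : i - l1.length < l2.length) :
    (l1 ++ l2)[i]! = l2[i - l1.length] := by
  have h : i < (l1 ++ l2).length := by simp; omega
  rw [List.getElem!_eq_getElem?_getD, List.getElem?_eq_getElem h]
  simp [List.getElem_append_right h1]

theorem pvFindEnd_spec : ∀ (k : Nat) (pre suf : List String) (v : String),
    suf.head? ≠ some v →
    pvFindEnd (pre ++ (List.replicate k v ++ suf)) v pre.length = pre.length + k := by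
  intro k
  induction k with
  | zero =>
    intro pre suf v hsuf
    rw [pvFindEnd]
    simp only [List.replicate_zero, List.nil_append]
    split
    · rename_i h
      have hsne : suf ≠ [] := by
        intro hnil; rw [hnil] at h; simp at h
      have : (pre ++ suf)[pre.length]'h = suf.head hsne := by
        rw [List.getElem_append_right (Nat.le_refl _)]
        simp [List.head_eq_getElem]
      have hne2 : ¬ ((pre ++ suf)[pre.length]'h = v) := by
        rw [this]
        intro hc
        rw [List.head?_eq_some_head hsne] at hsuf
        exact hsuf (by rw [hc])
      rw [if_neg hne2]
      omega
    · rfl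
  | succ k ih =>
    intro pre suf v hsuf
    rw [pvFindEnd]
    have hlt : pre.length < (pre ++ (List.replicate (k+1) v ++ suf)).length := by simp
    rw [dif_pos hlt]
    have hv : (pre ++ (List.replicate (k+1) v ++ suf))[pre.length]'hlt = v := by
      rw [List.getElem_append_right (Nat.le_refl _)]
      simp [List.replicate_succ]
    rw [if_pos hv]
    have hre : pre ++ (List.replicate (k+1) v ++ suf)
        = (pre ++ [v]) ++ (List.replicate k v ++ suf) := by
      rw [List.replicate_succ]; simp
    have hlen : pre.length + 1 = (pre ++ [v]).length := by simp
    rw [hre, hlen, ih (pre ++ [v]) suf v hsuf]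
    simp; omega

theorem pvMapIdx_id (l : List String) (f : Nat → String → String) (hf : ∀ i x, i < l.length → f i x = x) :
    l.mapIdx f = l := by
  apply List.ext_getElem
  · simp
  · intro i h1 h2
    simp only [List.getElem_mapIdx]
    exact hf i _ (by simpa using h1)

theorem pvMapIdx_const (l : List String) (f : Nat → String → String) (r : String) (hf : ∀ i x, i < l.length → f i x = r) :
    l.mapIdx f = List.replicate l.length r := by
  apply List.ext_getElem
  · simp
  · intro i h1 h2
    simp only [List.getElem_mapIdx, List.getElem_replicate]
    exact hf i _ (by simpa using h1)

theorem pvMapIdx_window (a b c : List String) (r : String) :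
    (a ++ (b ++ c)).mapIdx (fun i x => if a.length ≤ i ∧ i < a.length + b.length then r else x)
      = a ++ (List.replicate b.length r ++ c) := by
  rw [List.mapIdx_append, List.mapIdx_append]
  rw [pvMapIdx_id a _ (by intro i x h; simp; omega)]
  rw [pvMapIdx_const b _ r (by intro i x h; simp; omega)]
  rw [pvMapIdx_id c _ (by intro i x h; simp; omega)]

theorem pvFlat_head (rl : List (String × Nat)) (hlen : ∀ p ∈ rl, 1 ≤ p.2) :
    (pvFlat rl).head? = rl.head?.map Prod.fst := by
  cases rl with
  | nil => simp [pvFlat]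
  | cons p rest =>
    obtain ⟨v, n⟩ := p
    have hn : 1 ≤ n := hlen (v, n) List.mem_cons_self
    simp only [pvFlat, List.flatMap_cons]
    rw [show n = (n - 1) + 1 by omega, List.replicate_succ]
    simp

theorem pvMain (m : Int) (rl : List (String × Nat)) (done : List String) (i : Nat)
    (hlen : ∀ p ∈ rl, 1 ≤ p.2) (hok : pvRunsOk rl) (hi : i = 0 ↔ done = []) :
    pvLoopA (done ++ pvFlat rl) done.length m = pvBuildB done i rl m := by
  induction rl generalizing done i with
  | nil =>
    rw [pvLoopA, pvBuildB]
    simp [pvFlat]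
  | cons p rest ih =>
    obtain ⟨v, n⟩ := p
    have hn : 1 ≤ n := hlen (v, n) (List.mem_cons_self)
    obtain ⟨hv, hokr⟩ := hok
    have hlenr : ∀ q ∈ rest, 1 ≤ q.2 := fun q hq => hlen q (List.mem_cons_of_mem _ hq)
    have hFflat : pvFlat ((v, n) :: rest) = List.replicate n v ++ pvFlat rest := by
      simp [pvFlat]
    rw [hFflat]
    have hFhead : (pvFlat rest).head? ≠ some v := by
      rw [pvFlat_head rest hlenr]
      cases hre : rest.head? with
      | none => simp
      | some q =>
        have := hv q (by rw [Option.mem_def, hre])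
        simp [this]
    rw [pvLoopA]
    have hlt : done.length < (done ++ (List.replicate n v ++ pvFlat rest)).length := by
      simp; omega
    rw [dif_pos hlt]
    have hget : (done ++ (List.replicate n v ++ pvFlat rest))[done.length]! = v := by
      rw [pvGetBang _ _ _ (Nat.le_refl _) (by simp; omega)]
      simp only [Nat.sub_self]
      rw [List.getElem_append_left (by simpa using hn)]
      simp
    rw [hget]
    have hfind : pvFindEnd (done ++ (List.replicate n v ++ pvFlat rest)) v (done.length + 1)
        = done.length + n := by
      have hre : done ++ (List.replicate n v ++ pvFlat rest)
          = (done ++ [v]) ++ (List.replicate (n - 1) v ++ pvFlat rest) := by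
        rw [show n = (n - 1) + 1 by omega, List.replicate_succ]
        simp
      have hl1 : done.length + 1 = (done ++ [v]).length := by simp
      rw [hre, hl1, pvFindEnd_spec (n - 1) (done ++ [v]) (pvFlat rest) v hFhead]
      simp; omega
    rw [hfind]
    have hstep : ∃ w : String,
        pvStep (done ++ (List.replicate n v ++ pvFlat rest)) done.length (done.length + n) m
          = done ++ (List.replicate n w ++ pvFlat rest) ∧
        pvBuildB done i ((v, n) :: rest) m = pvBuildB (done ++ List.replicate n w) (i + 1) rest m := by
      rw [pvStep, pvBuildB]
      by_cases hm : (n : Int) ≥ m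
      · rw [if_neg (by push_cast; omega)]
        refine ⟨v, rfl, ?_⟩
        simp only [if_pos hm]
      · rw [if_pos (by push_cast; omega)]
        simp only [if_neg hm]
        by_cases hd : done = []
        · have hi0 : i = 0 := hi.mpr hd
          subst hd
          simp only [List.length_nil, gt_iff_lt, Nat.lt_irrefl, if_false, hi0,
            List.nil_append, Nat.zero_add]
          cases rest with
          | nil =>
            rw [if_neg (by simp [pvFlat])]
            exact ⟨v, rfl, rfl⟩
          | cons q r2 =>
            obtain ⟨v2, n2⟩ := q
            have hn2 : 1 ≤ n2 := hlenr (v2, n2) (List.mem_cons_self)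
            have hF2 : pvFlat ((v2, n2) :: r2) = v2 :: (List.replicate (n2 - 1) v2 ++ pvFlat r2) := by
              simp [pvFlat]
              rw [show n2 = (n2 - 1) + 1 by omega, List.replicate_succ]
              simp
            have hlt2 : n < (List.replicate n v ++ pvFlat ((v2, n2) :: r2)).length := by
              rw [hF2]; simp
            rw [if_pos hlt2]
            have hgete : (List.replicate n v ++ pvFlat ((v2, n2) :: r2))[n]! = v2 := by
              rw [pvGetBang _ _ _ (by simp) (by rw [hF2]; simp)]
              simp only [List.length_replicate, Nat.sub_self]
              rw [List.getElem_of_eq hF2]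
              simp
            rw [hgete]
            simp only [List.head?_cons, Option.map_some]
            by_cases hw : v2 = ""
            · refine ⟨v, ?_, ?_⟩ <;> simp [hw]
            · refine ⟨v2, ?_, ?_⟩
              · rw [if_pos hw]
                have := pvMapIdx_window [] (List.replicate n v) (pvFlat ((v2, n2) :: r2)) v2
                simpa using this
              · simp [hw]
        · have hi1 : ¬ i = 0 := fun h => hd (hi.mp h)
          have hdl : 0 < done.length := List.length_pos_of_ne_nil hd
          rw [if_pos hdl]
          simp only [if_neg hi1]
          have hgl : (done ++ (List.replicate n v ++ pvFlat rest))[done.length - 1]! = done.getLast hd := by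
            have h : done.length - 1 < (done ++ (List.replicate n v ++ pvFlat rest)).length := by
              simp; omega
            rw [List.getElem!_eq_getElem?_getD, List.getElem?_eq_getElem h]
            simp only [Option.getD_some]
            rw [List.getElem_append_left (by omega)]
            rw [List.getLast_eq_getElem]
          rw [hgl, List.getLast?_eq_some_getLast hd]
          by_cases hw : done.getLast hd = ""
          · refine ⟨v, ?_, ?_⟩ <;> simp [hw]
          · refine ⟨done.getLast hd, ?_, ?_⟩
            · rw [if_pos hw]
              have := pvMapIdx_window done (List.replicate n v) (pvFlat rest) (done.getLast hd)
              simpa using this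
            · simp [hw]
    obtain ⟨w, hA, hB⟩ := hstep
    rw [hA, hB]
    have hre2 : done ++ (List.replicate n w ++ pvFlat rest) = (done ++ List.replicate n w) ++ pvFlat rest := by
      simp
    have hln : done.length + n = (done ++ List.replicate n w).length := by simp
    rw [hre2, hln]
    exact ih (done ++ List.replicate n w) (i + 1) hlenr hokr
      (by constructor
          · intro h; omega
          · intro h
            have : n = 0 := by
              have := congrArg List.length h
              simp at this; omega
            omega)

-- ---- B-side lemmas: the three per-index passes compute pvBuildB on the run decomposition ----

theorem pvRepCons {α : Type} (n : Nat) (hn : 1 ≤ n) (a : α) :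
    List.replicate n a = a :: List.replicate (n - 1) a := by
  cases n with
  | zero => omega
  | succ k => simp [List.replicate_succ]

/-- [n, n-1, …, 1] -/
def pvDesc : Nat → List Nat
  | 0 => []
  | n + 1 => (n + 1) :: pvDesc n

theorem pvDesc_length (n : Nat) : (pvDesc n).length = n := by
  induction n with
  | zero => rfl
  | succ n ih => simp [pvDesc, ih]

theorem pvSuffLen_run (n : Nat) (hn : 1 ≤ n) (v : String) (t : List String)
    (ht : t.head? ≠ some v) :
    pvSuffLen (List.replicate n v ++ t) = pvDesc n ++ pvSuffLen t := by
  induction n with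
  | zero => omega
  | succ n ih =>
    cases n with
    | zero =>
      simp only [List.replicate_succ, List.replicate_zero, List.nil_append, List.cons_append]
      cases t with
      | nil => simp [pvSuffLen, pvDesc]
      | cons y ys =>
        have hne : ¬ v = y := by
          intro h; rw [List.head?_cons] at ht; exact ht (by rw [h])
        simp [pvSuffLen, pvDesc, hne]
    | succ n' =>
      have ihh := ih (by omega)
      rw [show List.replicate (n' + 1 + 1) v ++ t = v :: (List.replicate (n' + 1) v ++ t) by
        rw [List.replicate_succ]; simp]
      have hcons : List.replicate (n' + 1) v ++ t = v :: (List.replicate n' v ++ t) := by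
        rw [List.replicate_succ]; simp
      rw [hcons, pvSuffLen, ← hcons, ihh]
      rw [show pvDesc (n' + 1) = (n' + 1) :: pvDesc n' from rfl]
      simp [pvDesc]

theorem pvFix_run (n : Nat) (v : String) : ∀ (j : Nat) (ds ss : List Nat) (t : List String),
    ds.length = j → t.head? ≠ some v →
    pvFix v n (List.replicate j v ++ t) (ds ++ ss) = List.replicate j n ++ pvFix0 t ss := by
  intro j
  induction j with
  | zero =>
    intro ds ss t hds ht
    rw [List.length_eq_zero_iff.mp hds]
    simp only [List.replicate_zero, List.nil_append]
    cases t with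
    | nil => cases ss <;> simp [pvFix, pvFix0]
    | cons k ks =>
      cases ss with
      | nil => simp [pvFix, pvFix0]
      | cons l ls =>
        have hne : ¬ k = v := by
          intro h; rw [List.head?_cons] at ht; exact ht (by rw [h])
        simp [pvFix, pvFix0, hne]
  | succ j ih =>
    intro ds ss t hds ht
    cases ds with
    | nil => simp at hds
    | cons d ds' =>
      rw [show List.replicate (j + 1) v ++ t = v :: (List.replicate j v ++ t) by
        rw [List.replicate_succ]; simp]
      simp only [List.cons_append, pvFix, if_true]
      rw [ih ds' ss t (by simpa using hds) ht]
      simp [List.replicate_succ]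

theorem pvRunLens_flat (rl : List (String × Nat)) (hlen : ∀ p ∈ rl, 1 ≤ p.2)
    (hok : pvRunsOk rl) :
    pvRunLens (pvFlat rl) = rl.flatMap (fun p => List.replicate p.2 p.2) := by
  induction rl with
  | nil => simp [pvRunLens, pvFlat, pvFix0, pvSuffLen]
  | cons p rest ih =>
    obtain ⟨v, n⟩ := p
    have hn : 1 ≤ n := hlen (v, n) List.mem_cons_self
    obtain ⟨hv, hokr⟩ := hok
    have hlenr : ∀ q ∈ rest, 1 ≤ q.2 := fun q hq => hlen q (List.mem_cons_of_mem _ hq)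
    have hFhead : (pvFlat rest).head? ≠ some v := by
      rw [pvFlat_head rest hlenr]
      cases hre : rest.head? with
      | none => simp
      | some q =>
        have := hv q (by rw [Option.mem_def, hre])
        simp [this]
    have hflat : pvFlat ((v, n) :: rest) = List.replicate n v ++ pvFlat rest := by
      simp [pvFlat]
    rw [pvRunLens, hflat, pvSuffLen_run n hn v _ hFhead]
    have hrep : List.replicate n v ++ pvFlat rest = v :: (List.replicate (n - 1) v ++ pvFlat rest) := by
      rw [pvRepCons n hn]; simp
    have hdesc : pvDesc n = n :: pvDesc (n - 1) := by
      cases n with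
      | zero => omega
      | succ k => simp [pvDesc]
    rw [hrep, hdesc]
    simp only [pvFix0, List.cons_append]
    rw [pvFix_run n v (n - 1) (pvDesc (n - 1)) (pvSuffLen (pvFlat rest)) (pvFlat rest)
      (pvDesc_length (n - 1)) hFhead]
    rw [← pvRunLens, ih hlenr hokr]
    rw [List.flatMap_cons]
    rw [pvRepCons n hn]
    simp

theorem pvZip_replicate {α β : Type} (n : Nat) (a : α) (b : β) :
    (List.replicate n a).zip (List.replicate n b) = List.replicate n (a, b) := by
  induction n with
  | zero => rfl
  | succ n ih => simp [List.replicate_succ, ih]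

theorem pvZip_flat (rl : List (String × Nat)) :
    (pvFlat rl).zip (rl.flatMap fun p => List.replicate p.2 p.2)
      = rl.flatMap (fun p => List.replicate p.2 p) := by
  induction rl with
  | nil => simp [pvFlat]
  | cons p rest ih =>
    obtain ⟨v, n⟩ := p
    simp only [pvFlat, List.flatMap_cons] at ih ⊢
    rw [List.zip_append (by simp)]
    rw [ih, pvZip_replicate]

theorem pvGetLastBang (out : List String) (w : String) : (out ++ [w]).getLast! = w := by
  rw [List.getLast!_eq_getLast?_getD, List.getLast?_concat]
  rfl

theorem pvPass3_keep (m : Int) (repl0 : Option String) (v : String) (n : Nat)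
    (hm : (n : Int) ≥ m) :
    ∀ (j : Nat) (out : List String) (z : List (String × Nat)),
    pvPass3 m repl0 (some v) out (List.replicate j (v, n) ++ z)
      = pvPass3 m repl0 (some v) (out ++ List.replicate j v) z := by
  intro j
  induction j with
  | zero => intro out z; simp
  | succ j ih =>
    intro out z
    rw [List.replicate_succ, List.cons_append, pvPass3, if_pos hm]
    rw [ih (out ++ [v]) z]
    simp [List.replicate_succ]

theorem pvPass3_short (m : Int) (repl0 : Option String) (v : String) (n : Nat)
    (hm : ¬ (n : Int) ≥ m) (w : String) :
    ∀ (j : Nat) (out : List String) (z : List (String × Nat)),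
    out.getLast! = w →
    pvPass3 m repl0 (some v) out (List.replicate j (v, n) ++ z)
      = pvPass3 m repl0 (some v) (out ++ List.replicate j w) z := by
  intro j
  induction j with
  | zero => intro out z _; simp
  | succ j ih =>
    intro out z hw
    rw [List.replicate_succ, List.cons_append, pvPass3, if_neg hm, if_pos rfl, hw]
    rw [ih (out ++ [w]) z (pvGetLastBang out w)]
    simp [List.replicate_succ]

theorem pvPass3_main (m : Int) (repl0 : Option String) :
    ∀ (rl : List (String × Nat)) (done : List String) (prev : Option String) (i : Nat),
    (∀ p ∈ rl, 1 ≤ p.2) → pvRunsOk rl →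
    (i = 0 → prev = none ∧ repl0 = rl.tail.head?.map Prod.fst) →
    (i ≠ 0 → ∃ pk, prev = some pk ∧ ∀ p ∈ rl.head?, p.1 ≠ pk) →
    pvPass3 m repl0 prev done (rl.flatMap fun p => List.replicate p.2 p)
      = pvBuildB done i rl m := by
  intro rl
  induction rl with
  | nil => intro done prev i _ _ _ _; simp [pvPass3, pvBuildB]
  | cons p rest ih =>
    intro done prev i hlen hok h0 h1
    obtain ⟨v, n⟩ := p
    have hn : 1 ≤ n := hlen (v, n) List.mem_cons_self
    obtain ⟨hv, hokr⟩ := hok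
    have hlenr : ∀ q ∈ rest, 1 ≤ q.2 := fun q hq => hlen q (List.mem_cons_of_mem _ hq)
    have hprevne : prev ≠ some v := by
      by_cases hi : i = 0
      · rw [(h0 hi).1]; simp
      · obtain ⟨pk, hpk, hne⟩ := h1 hi
        rw [hpk]
        have := hne (v, n) (by simp)
        simp; intro h; exact this h.symm
    rw [List.flatMap_cons, pvRepCons n hn (v, n), List.cons_append, pvBuildB]
    simp only [pvPass3]
    have hrestne : ∀ p ∈ rest.head?, p.1 ≠ v := hv
    have ihrest : ∀ w : String,
        pvPass3 m repl0 (some v) (done ++ List.replicate n w) (rest.flatMap fun p => List.replicate p.2 p)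
          = pvBuildB (done ++ List.replicate n w) (i + 1) rest m := by
      intro w
      exact ih (done ++ List.replicate n w) (some v) (i + 1) hlenr hokr
        (by intro h; omega) (by intro _; exact ⟨v, rfl, hrestne⟩)
    by_cases hm : (n : Int) ≥ m
    · rw [if_pos hm]
      simp only [if_pos hm]
      rw [pvPass3_keep m repl0 v n hm (n - 1) (done ++ [v]) _]
      rw [show (done ++ [v]) ++ List.replicate (n - 1) v = done ++ List.replicate n v by
        rw [pvRepCons n hn v]; simp]
      exact ihrest v
    · rw [if_neg hm, if_neg hprevne]
      simp only [if_neg hm]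
      have finish : ∀ ropt : Option String,
          pvPass3 m repl0 (some v)
              (done ++ [match ropt with | some r => if r ≠ "" then r else v | none => v])
              (List.replicate (n - 1) (v, n) ++ List.flatMap (fun p => List.replicate p.2 p) rest)
            = pvBuildB
                (done ++ match ropt with
                  | some r => if r ≠ "" then List.replicate n r else List.replicate n v
                  | none => List.replicate n v)
                (i + 1) rest m := by
        intro ropt
        have hex : ∃ w : String,
            (match ropt with | some r => if r ≠ "" then r else v | none => v) = w ∧
            (match ropt with
              | some r => if r ≠ "" then List.replicate n r else List.replicate n v
              | none => List.replicate n v) = List.replicate n w := by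
          cases ropt with
          | none => exact ⟨v, rfl, rfl⟩
          | some r =>
            by_cases hr : r = ""
            · exact ⟨v, by simp [hr], by simp [hr]⟩
            · exact ⟨r, by simp [hr], by simp [hr]⟩
        obtain ⟨w, hw1, hw2⟩ := hex
        rw [hw1, hw2]
        rw [pvPass3_short m repl0 v n hm w (n - 1) (done ++ [w]) _ (pvGetLastBang done w)]
        rw [show (done ++ [w]) ++ List.replicate (n - 1) w = done ++ List.replicate n w by
          rw [pvRepCons n hn w]; simp]
        exact ihrest w
      cases prev with
      | none =>
        have hi : i = 0 := by
          by_contra hc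
          obtain ⟨pk, hpk, _⟩ := h1 hc
          simp at hpk
        have hr : repl0 = rest.head?.map Prod.fst := by simpa using (h0 hi).2
        rw [if_pos hi, ← hr]
        exact finish repl0
      | some pk =>
        have hi : ¬ i = 0 := by
          intro hc
          have := (h0 hc).1
          simp at this
        rw [if_neg hi]
        exact finish done.getLast?

theorem pvAlt_build (keys : List String) (m : Int) (hne : keys ≠ []) :
    (let L := pvRunLens keys
     let first_repl : Option String :=
       match L.head? with
       | some l0 => keys[l0]?
       | none => none
     pvPass3 m first_repl none [] (keys.zip L))
      = pvBuildB [] 0 (pvRuns keys) m := by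
  have hlen := pvRuns_len_pos keys
  have hok := pvRuns_ok keys
  have hflat := pvRuns_flat keys
  have hL : pvRunLens keys = (pvRuns keys).flatMap (fun p => List.replicate p.2 p.2) := by
    have h := pvRunLens_flat (pvRuns keys) hlen hok
    rw [hflat] at h
    exact h
  have hzip : keys.zip (pvRunLens keys) = (pvRuns keys).flatMap (fun p => List.replicate p.2 p) := by
    have h := pvZip_flat (pvRuns keys)
    rw [hflat] at h
    rw [hL]
    exact h
  cases hrl : pvRuns keys with
  | nil =>
    exfalso
    have := hflat
    rw [hrl] at this
    simp [pvFlat] at this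
    exact hne this
  | cons p rest =>
    obtain ⟨v, n⟩ := p
    have hn : 1 ≤ n := by
      have := hlen (v, n) (by rw [hrl]; exact List.mem_cons_self)
      simpa using this
    have hlenr : ∀ q ∈ rest, 1 ≤ q.2 := fun q hq =>
      hlen q (by rw [hrl]; exact List.mem_cons_of_mem _ hq)
    have hLhead : (pvRunLens keys).head? = some n := by
      rw [hL, hrl, List.flatMap_cons, pvRepCons n hn n]
      simp
    have hget : keys[n]? = rest.head?.map Prod.fst := by
      rw [← hflat, hrl]
      have : pvFlat ((v, n) :: rest) = List.replicate n v ++ pvFlat rest := by simp [pvFlat]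
      rw [this, List.getElem?_append_right (by simp)]
      simp only [List.length_replicate, Nat.sub_self]
      rw [← List.head?_eq_getElem?]
      exact pvFlat_head rest hlenr
    simp only [hLhead]
    rw [hzip, hrl]
    rw [hget]
    exact pvPass3_main m (rest.head?.map Prod.fst) ((v, n) :: rest) [] none 0
      (by rw [← hrl]; exact hlen) (by rw [← hrl]; exact hok)
      (fun _ => ⟨rfl, by simp⟩) (fun h => absurd rfl h)

theorem smooth_eq (keys : List String) (min_run : Int) :
    smooth_short_substage_runs_py keys min_run = smooth_short_substage_runs_py_alt keys min_run := by
  unfold smooth_short_substage_runs_py smooth_short_substage_runs_py_alt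
  split
  · rfl
  · rename_i hguard
    have hne : keys ≠ [] := by
      intro h; subst h; simp at hguard
    have hA := pvMain min_run (pvRuns keys) [] 0 (pvRuns_len_pos keys) (pvRuns_ok keys) (by simp)
    rw [pvRuns_flat keys] at hA
    simpa using hA.trans (pvAlt_build keys min_run hne).symm

-- ===== VERDICT (by name: the statement is the Claim_ definition above) =====
theorem smooth_short_substage_runs_py_spec : Claim_equal_smooth_short_substage_runs_py := by
  intro keys min_run _
  exact smooth_eq keys min_run
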